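-- pv_equiv track=rewrite | github.com/HAMIDMOO/ILIa | Name to name.py | Name_to_Name
-- ===== SOURCE A (Python) =====
-- def Name_to_Name(lst):
--     final_lst=[]
--     for i in lst:
--         new_lst=[]
--         new_lst.append(i)
--         y=i[-1]
--         should_restart = True
--         while should_restart:
--             should_restart = False
--             for z in lst:
--              if y == z[0] and z not in new_lst:
--                     new_lst.append(z)
--                     y = z[-1]
--                     should_restart = True
--                     break
--         if len(new_lst) > len(final_lst):
--             final_lst= new_lst
--     return final_lst
-- ===== SOURCE B (Python) =====
-- def Name_to_Name(lst):
--     # Recursive chain extension returning the tail directly (no restart flag,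
--     # no accumulator append), with the best chain picked by max(key=len).
--     def ext(y, used):
--         for z in lst:
--             if y == z[0] and z not in used:
--                 return [z] + ext(z[-1], used | {z})
--         return []
--     return max(([i] + ext(i[-1], {i}) for i in lst), key=len, default=[])
-- ===== Notes on version B (the rewrite author's own statement) =====
-- stated objective: simpler
-- what changed: B replaces A's restart-flag while-loop with accumulator appends and manual best-tracking by a recursive chain-extension function that returns the tail of the chain directly (back-to-front construction with a used-set) and a single max with key=len and an empty-list default to pick the longest chain.
import Mathlib
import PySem

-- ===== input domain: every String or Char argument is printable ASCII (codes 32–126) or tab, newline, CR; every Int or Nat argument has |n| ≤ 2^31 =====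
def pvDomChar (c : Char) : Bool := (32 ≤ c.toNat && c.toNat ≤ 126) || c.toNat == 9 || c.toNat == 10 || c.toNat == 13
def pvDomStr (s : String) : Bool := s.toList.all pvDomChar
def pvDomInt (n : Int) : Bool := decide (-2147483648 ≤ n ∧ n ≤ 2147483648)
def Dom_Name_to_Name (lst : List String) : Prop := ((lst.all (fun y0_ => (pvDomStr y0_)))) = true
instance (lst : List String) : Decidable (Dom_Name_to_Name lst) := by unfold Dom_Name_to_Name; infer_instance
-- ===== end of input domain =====

-- B replaces the restart-flag loop and manual best-tracking by a recursive
-- chain-extension returning the tail directly plus max(key=len); equal to A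
-- on lists without the empty string (A raises IndexError at ""[0]/""[-1]).


-- shared character helpers: w[0] / w[-1]; exact for nonempty w (Pre_ excludes "" ∈ lst)
def pvFirst (z : String) : Char := ((PySem.Str.pyGet? z 0).getD ' ')
def pvLast (z : String) : Char := ((PySem.Str.pyGet? z (-1)).getD ' ')

-- ===== PORT A =====
-- the inner 'for z in lst: if y == z[0] and z not in new_lst: … break'
def pvFindA (lst : List String) (y : Char) (acc : List String) : Option String :=
  lst.find? (fun z => y == pvFirst z && !(acc.contains z))

-- the 'while should_restart' loop; each pass appends a fresh word of lst to acc
-- (which already holds i ∈ lst), so lst.length passes always suffice as fuel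
def pvChainA (lst : List String) : Nat → Char → List String → List String
  | 0, _, acc => acc
  | fuel+1, y, acc =>
    match pvFindA lst y acc with
    | some z => pvChainA lst fuel (pvLast z) (acc ++ [z])
    | none => acc

def Name_to_Name (lst : List String) : List String :=
  lst.foldl (fun final i =>
    let nl := pvChainA lst lst.length (pvLast i) [i]
    if final.length < nl.length then nl else final) []

-- ===== PORT B =====
-- 'def ext(y, used): for z in lst: if y == z[0] and z not in used: return
-- [z] + ext(z[-1], used | {z}); return []' — the recursion consumes a fresh
-- word of lst each call, so lst.length calls always suffice as fuel
def pvExt (lst : List String) : Nat → Char → PySem.Set String → List String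
  | 0, _, _ => []
  | fuel+1, y, used =>
    match lst.find? (fun z => y == pvFirst z && !(PySem.Set.contains used z)) with
    | some z => z :: pvExt lst fuel (pvLast z) (PySem.Set.add used z)
    | none => []

-- max(([i] + ext(i[-1], {i}) for i in lst), key=len, default=[])
def Name_to_Name_alt (lst : List String) : List String :=
  PySem.List.maxD
    (lst.map (fun i => i :: pvExt lst lst.length (pvLast i) (PySem.Set.ofList [i])))
    (fun c => c.length) []

-- ===== PRECONDITION & SPEC =====
-- Pre_ excludes exactly the lists containing "", on which A (and B) raise IndexError at ""[0]/""[-1]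
def Pre_Name_to_Name (lst : List String) : Prop := "" ∉ lst
instance (lst : List String) : Decidable (Pre_Name_to_Name lst) := by
  unfold Pre_Name_to_Name; infer_instance
def pvWitness_Name_to_Name : List String := ["ab", "bc", "ca"]

def Spec_Name_to_Name (lst : List String) (out : List String) : Prop := out = Name_to_Name_alt lst
instance (lst : List String) (out : List String) : Decidable (Spec_Name_to_Name lst out) := by unfold Spec_Name_to_Name; infer_instance

-- ===== CLAIM =====
def Claim_equal_Name_to_Name : Prop := ∀ (lst : List String), Dom_Name_to_Name lst → Pre_Name_to_Name lst → Spec_Name_to_Name lst (Name_to_Name lst)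

-- ===== LEMMAS AND PROOFS =====

-- A's append-accumulator loop builds exactly acc ++ (B's tail-returning chain)
theorem pvChainA_eq_ext (lst : List String) (fuel : Nat) :
    ∀ (y : Char) (acc : List String),
    pvChainA lst fuel y acc = acc ++ pvExt lst fuel y acc := by
  induction fuel with
  | zero => intro y acc; simp [pvChainA, pvExt]
  | succ f ih =>
    intro y acc
    have hdec : (fun z : String => y == pvFirst z && !(PySem.Set.contains acc z))
        = fun z => y == pvFirst z && !(acc.contains z) := by
      funext z; simp [PySem.Set.contains]
    unfold pvChainA pvExt pvFindA
    simp only [hdec]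
    cases hf : lst.find? (fun z => y == pvFirst z && !(acc.contains z)) with
    | none =>
      simp
    | some z =>
      have hp := List.find?_some hf
      simp only [Bool.and_eq_true, Bool.not_eq_true'] at hp
      have hnz : z ∉ acc := by simpa using hp.2
      have hadd : PySem.Set.add acc z = acc ++ [z] := by
        simp [PySem.Set.add, PySem.Set.contains, hnz]
      simp only [hadd, ih]
      simp

-- max(b::t, key) is the plain running-max foldl started at b (first maximum kept)
theorem max?_cons (key : List String → Nat) (t : List (List String)) :
    ∀ (b : List String),
    PySem.List.max? (b :: t) key
    = some (t.foldl (fun m x => if key m < key x then x else m) b) := by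
  induction t with
  | nil => intro b; rfl
  | cons c t ih =>
    intro b
    by_cases h : key b < key c
    · show List.foldl _ (if key b < key c then some c else some b) t = _
      rw [if_pos h]
      simp only [List.foldl_cons, if_pos h]
      exact ih c
    · show List.foldl _ (if key b < key c then some c else some b) t = _
      rw [if_neg h]
      simp only [List.foldl_cons, if_neg h]
      exact ih b

-- A's 'if len(new_lst) > len(final_lst)' fold from [] is max(key=len, default=[])
-- when every candidate chain is nonempty
theorem foldl_best_eq_maxD (cs : List (List String)) (h : ∀ c ∈ cs, c ≠ []) :
    cs.foldl (fun m x => if m.length < x.length then x else m) []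
    = PySem.List.maxD cs (fun c => c.length) [] := by
  cases cs with
  | nil => rfl
  | cons c t =>
    have hc : c ≠ [] := h c (by simp)
    have h0 : ([] : List String).length < c.length := by
      cases c with
      | nil => exact absurd rfl hc
      | cons a s => simp
    show List.foldl _ (if List.length [] < c.length then c else []) t = _
    rw [if_pos h0]
    unfold PySem.List.maxD
    rw [max?_cons (fun c => c.length), Option.getD_some]

-- ===== VERDICT =====
theorem Name_to_Name_spec : Claim_equal_Name_to_Name := by
  intro lst _ _
  unfold Spec_Name_to_Name Name_to_Name Name_to_Name_alt
  have hmap : ∀ i : String,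
      pvChainA lst lst.length (pvLast i) [i]
        = i :: pvExt lst lst.length (pvLast i) (PySem.Set.ofList [i]) := by
    intro i
    have h1 : PySem.Set.ofList [i] = ([i] : List String) :=
      PySem.Set.ofList_eq_self_of_nodup _ (by simp)
    rw [h1, pvChainA_eq_ext]
    rfl
  calc lst.foldl (fun final i =>
        let nl := pvChainA lst lst.length (pvLast i) [i]
        if final.length < nl.length then nl else final) []
      = (lst.map (fun i => i :: pvExt lst lst.length (pvLast i)
          (PySem.Set.ofList [i]))).foldl
          (fun m x => if m.length < x.length then x else m) [] := by
        rw [List.foldl_map]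
        exact PySem.List.foldl_congr_mem _ _ _ _ (fun b i _ => by simp only [hmap i])
    _ = _ := foldl_best_eq_maxD _ (by
        intro c hc
        rcases List.mem_map.mp hc with ⟨i, _, rfl⟩
        simp)
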